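-- pv_equiv track=rewrite | github.com/YoonDii/ALGORITHM | 프로그래머스/lv0/120853. 컨트롤 제트/컨트롤 제트.py | solution
-- ===== SOURCE A (Python) =====
-- def solution(s):
--     stack = []
--     for num in s.split():
--         try:
--             stack.append(int(num))
--         except:
--             if stack:
--                 stack.pop()
--     return sum(stack)
-- ===== SOURCE B (Python) =====
-- def solution(s):
--     # Reverse scan: no stack at all. A non-int token cancels the nearest
--     # uncancelled int to its left, so scanning right-to-left we only need a
--     # counter of pending cancellations and a running total (O(1) extra space).
--     skip = 0
--     total = 0
--     for tok in reversed(s.split()):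
--         try:
--             n = int(tok)
--         except:
--             skip += 1
--         else:
--             if skip:
--                 skip -= 1
--             else:
--                 total += n
--     return total
-- ===== Notes on version B (the rewrite author's own statement) =====
-- stated objective: alternative
-- what changed: B scans the tokens right-to-left with only a pending-cancellation counter and a running total (no stack at all, O(1) extra space): a non-int token increments the counter, an int is skipped if the counter is positive, otherwise added; A simulates the stack forward and sums the survivors.
import Mathlib
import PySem

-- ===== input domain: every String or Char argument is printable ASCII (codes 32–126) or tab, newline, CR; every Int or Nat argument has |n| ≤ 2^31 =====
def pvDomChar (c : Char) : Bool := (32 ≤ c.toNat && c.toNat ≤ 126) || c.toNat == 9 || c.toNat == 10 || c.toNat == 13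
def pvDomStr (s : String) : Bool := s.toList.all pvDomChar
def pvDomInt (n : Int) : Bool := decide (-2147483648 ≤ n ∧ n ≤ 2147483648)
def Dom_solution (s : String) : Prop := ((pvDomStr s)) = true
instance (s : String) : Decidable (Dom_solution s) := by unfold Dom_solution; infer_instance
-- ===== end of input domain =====

-- B replaces A's forward stack simulation by a reverse scan with a pending-cancellation counter and no stack (alternative algorithm, O(1) extra space).

-- ===== PORT A =====
-- one iteration of A's loop: push int(num) on success, else pop if nonempty
def solutionStepA (st : List Int) (num : String) : List Int :=
  match PySem.Int.ofStr? num with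
  | some n => st ++ [n]
  | none => if st.isEmpty then st else st.dropLast

def solution (s : String) : Int :=
  ((PySem.Str.split₀ s).foldl solutionStepA []).sum

-- ===== PORT B =====
-- one iteration of B's reverse loop over (skip, total)
def solutionStepB (acc : Nat × Int) (tok : String) : Nat × Int :=
  match PySem.Int.ofStr? tok with
  | some n => if acc.1 > 0 then (acc.1 - 1, acc.2) else (acc.1, acc.2 + n)
  | none => (acc.1 + 1, acc.2)

def solution_alt (s : String) : Int :=
  (((PySem.Str.split₀ s).reverse).foldl solutionStepB (0, 0)).2

-- ===== PRECONDITION & SPEC =====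
def Spec_solution (s : String) (out : Int) : Prop := out = solution_alt s
instance (s : String) (out : Int) : Decidable (Spec_solution s out) := by unfold Spec_solution; infer_instance

-- ===== CLAIM (what is proved, stated in full; the proofs are below) =====
def Claim_equal_solution : Prop := ∀ (s : String), Dom_solution s → Spec_solution s (solution s)

-- ===== LEMMAS AND PROOFS =====

-- Invariant: running A forward from stack `st` sums to B's reverse-scan total `t`
-- plus the part of `st` that survives B's pending-cancellation count `k`.
theorem solution_invariant (l : List String) (st : List Int) :
    ((l.foldl solutionStepA st).sum)
      = (l.foldr (fun x y => solutionStepB y x) (0, 0)).2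
        + (st.take (st.length - (l.foldr (fun x y => solutionStepB y x) (0, 0)).1)).sum := by
  induction l generalizing st with
  | nil => simp
  | cons tok rest ih =>
    simp only [List.foldl_cons, List.foldr_cons]
    rw [ih (solutionStepA st tok)]
    set acc := rest.foldr (fun x y => solutionStepB y x) (0, 0) with hacc
    obtain ⟨k, t⟩ := acc
    unfold solutionStepA solutionStepB
    cases h : PySem.Int.ofStr? tok with
    | some n =>
      simp only
      by_cases hk : k > 0
      · obtain ⟨j, rfl⟩ : ∃ j, k = j + 1 := ⟨k - 1, by omega⟩
        simp only [hk, if_pos]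
        have h1 : st.length + 1 - (j + 1) = st.length - j := by omega
        have h2 : (st ++ [n]).take (st.length - j) = st.take (st.length - j) := by
          rw [List.take_append_of_le_length (by omega)]
        simp [h1, h2]
      · have hk0 : k = 0 := by omega
        subst hk0
        simp
        ring
    | none =>
      simp only
      by_cases hst : st.isEmpty
      · have : st = [] := List.isEmpty_iff.mp hst
        simp [this]
      · have htk : st.dropLast.take (st.dropLast.length - k)
            = st.take (st.length - (k + 1)) := by
          rw [List.dropLast_eq_take, List.take_take]
          congr 1
          simp [List.length_take]
          omega
        rw [if_neg hst, htk]

-- ===== VERDICT (by name: the statement is the Claim_ definition above) =====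
theorem solution_spec : Claim_equal_solution := by
  intro s _
  unfold Spec_solution solution solution_alt
  rw [List.foldl_reverse]
  have := solution_invariant (PySem.Str.split₀ s) []
  simpa using this
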